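-- pv_equiv track=rewrite | github.com/haolunc/ARC-RL | reference_solutions/solutions/868de0fa.py | transform
-- ===== SOURCE A (Python) =====
-- def transform(grid):
--
--     g = [row[:] for row in grid]
--     n = len(g)
--     m = len(g[0]) if n > 0 else 0
--
--     frames = []
--
--     for r1 in range(n - 1):
--         for r2 in range(r1 + 2, n):
--             for c1 in range(m - 1):
--                 for c2 in range(c1 + 2, m):
--
--                     ok = True
--                     for c in range(c1, c2 + 1):
--                         if g[r1][c] != 1 or g[r2][c] != 1:
--                             ok = False
--                             break
--                     if not ok:
--                         continue
--
--                     for r in range(r1, r2 + 1):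
--                         if g[r][c1] != 1 or g[r][c2] != 1:
--                             ok = False
--                             break
--                     if ok:
--                         frames.append((r1, c1, r2, c2))
--
--     for (r1, c1, r2, c2) in frames:
--         height = r2 - r1 - 1
--         width = c2 - c1 - 1
--         if height <= 0 or width <= 0:
--             continue
--         color = 2 if (height % 2 == 0 and width % 2 == 0) else 7
--         for r in range(r1 + 1, r2):
--             for c in range(c1 + 1, c2):
--                 if g[r][c] == 0:
--                     g[r][c] = color
--
--     return g
-- ===== SOURCE B (Python) =====
-- def transform(grid):
--     n = len(grid)
--     m = len(grid[0]) if n > 0 else 0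
--
--     # prefix sums of "== 1": rowpref[r][c] = #ones in grid[r][0:c], colpref[c][r] = #ones in column c rows 0:r
--     rowpref = []
--     for r in range(n):
--         s = 0
--         acc = [0]
--         for c in range(m):
--             s += 1 if grid[r][c] == 1 else 0
--             acc.append(s)
--         rowpref.append(acc)
--     colpref = []
--     for c in range(m):
--         s = 0
--         acc = [0]
--         for r in range(n):
--             s += 1 if grid[r][c] == 1 else 0
--             acc.append(s)
--         colpref.append(acc)
--
--     frames = []
--     for r1 in range(n - 1):
--         for r2 in range(r1 + 2, n):
--             for c1 in range(m - 1):
--                 for c2 in range(c1 + 2, m):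
--                     w = c2 - c1 + 1
--                     h = r2 - r1 + 1
--                     if (rowpref[r1][c2 + 1] - rowpref[r1][c1] == w
--                             and rowpref[r2][c2 + 1] - rowpref[r2][c1] == w
--                             and colpref[c1][r2 + 1] - colpref[c1][r1] == h
--                             and colpref[c2][r2 + 1] - colpref[c2][r1] == h):
--                         frames.append((r1, c1, r2, c2))
--
--     out = [row[:] for row in grid]
--     for (r1, c1, r2, c2) in frames:
--         color = 2 if ((r2 - r1) % 2 == 1 and (c2 - c1) % 2 == 1) else 7
--         for r in range(r1 + 1, r2):
--             for c in range(c1 + 1, c2):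
--                 if out[r][c] == 0:
--                     out[r][c] = color
--     return out
-- ===== Notes on version B (the rewrite author's own statement) =====
-- stated objective: faster
-- what changed: B precomputes row and column prefix sums of the '== 1' indicator once, so each candidate frame's four borders are checked in O(1) instead of A's O(n+m) short-circuit scans; frame enumeration order and interior painting are kept, and A's dead height/width guard is dropped.
-- outside the precondition, e.g. on transform([[1, 1], [0]]): A returns [[1, 1], [0]], B raises IndexError
import Mathlib
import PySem

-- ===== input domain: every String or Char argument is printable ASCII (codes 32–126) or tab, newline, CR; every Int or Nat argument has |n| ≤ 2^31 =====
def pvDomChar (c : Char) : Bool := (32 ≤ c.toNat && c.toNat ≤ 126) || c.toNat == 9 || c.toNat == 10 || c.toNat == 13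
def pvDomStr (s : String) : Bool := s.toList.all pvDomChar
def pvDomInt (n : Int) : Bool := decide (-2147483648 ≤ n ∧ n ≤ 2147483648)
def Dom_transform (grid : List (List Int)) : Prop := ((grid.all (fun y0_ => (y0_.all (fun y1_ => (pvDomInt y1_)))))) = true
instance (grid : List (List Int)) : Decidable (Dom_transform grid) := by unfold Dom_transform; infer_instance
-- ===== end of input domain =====

-- B replaces A's O(n+m) per-candidate border scans by O(1) prefix-sum segment checks
-- (same frame enumeration order, same interior painting); the return values are proved equal.

-- shared cell read g[r][c] (both Pythons index with nonnegative in-range indices only)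
def pvCell (g : List (List Int)) (r c : Int) : Int := (g.getD r.toNat []).getD c.toNat 0

-- shared interior-painting inner loops (textually identical in Source A and Source B)
def pvFill (g : List (List Int)) (r1 c1 r2 c2 color : Int) : List (List Int) :=
  (PySem.List.pyRange (r1+1) r2 1).foldl (fun g r =>
    (PySem.List.pyRange (c1+1) c2 1).foldl (fun g c =>
      if pvCell g r c == 0 then g.set r.toNat ((g.getD r.toNat []).set c.toNat color) else g) g) g

-- ===== PORT A =====
def pvFramesA (g : List (List Int)) (n m : Int) : List (Int × Int × Int × Int) :=
  (PySem.List.pyRange 0 (n-1) 1).foldl (fun fs r1 =>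
    (PySem.List.pyRange (r1+2) n 1).foldl (fun fs r2 =>
      (PySem.List.pyRange 0 (m-1) 1).foldl (fun fs c1 =>
        (PySem.List.pyRange (c1+2) m 1).foldl (fun fs c2 =>
          let ok := (PySem.List.pyRange c1 (c2+1) 1).all (fun c =>
            pvCell g r1 c == 1 && pvCell g r2 c == 1)
          if !ok then fs
          else
            let ok2 := (PySem.List.pyRange r1 (r2+1) 1).all (fun r =>
              pvCell g r c1 == 1 && pvCell g r c2 == 1)
            if ok2 then fs ++ [(r1, c1, r2, c2)] else fs) fs) fs) fs) []

def transform (grid : List (List Int)) : List (List Int) :=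
  let g := grid
  let n : Int := g.length
  let m : Int := if 0 < n then ((g.getD 0 []).length : Int) else 0
  let frames := pvFramesA g n m
  frames.foldl (fun g fr =>
    let height := fr.2.2.1 - fr.1 - 1
    let width := fr.2.2.2 - fr.2.1 - 1
    if height ≤ 0 ∨ width ≤ 0 then g
    else
      let color : Int := if PySem.Int.mod height 2 == 0 && PySem.Int.mod width 2 == 0 then 2 else 7
      pvFill g fr.1 fr.2.1 fr.2.2.1 fr.2.2.2 color) g

-- ===== PORT B =====
-- prefix-sum scan: s = 0; acc = [0]; for i in range(len): s += (f(i) == 1); acc.append(s)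
def pvStep (f : Int → Int) (st : Int × List Int) (i : Int) : Int × List Int :=
  let s := st.1 + (if f i == 1 then (1:Int) else 0)
  (s, st.2 ++ [s])

def pvPref (f : Int → Int) (len : Int) : List Int :=
  ((PySem.List.pyRange 0 len 1).foldl (pvStep f) (0, [0])).2

def pvFramesB (rowpref colpref : List (List Int)) (n m : Int) : List (Int × Int × Int × Int) :=
  (PySem.List.pyRange 0 (n-1) 1).foldl (fun fs r1 =>
    (PySem.List.pyRange (r1+2) n 1).foldl (fun fs r2 =>
      (PySem.List.pyRange 0 (m-1) 1).foldl (fun fs c1 =>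
        (PySem.List.pyRange (c1+2) m 1).foldl (fun fs c2 =>
          let R1 := rowpref.getD r1.toNat []
          let R2 := rowpref.getD r2.toNat []
          let Ca := colpref.getD c1.toNat []
          let Cb := colpref.getD c2.toNat []
          if R1.getD (c2+1).toNat 0 - R1.getD c1.toNat 0 == c2 - c1 + 1 &&
             R2.getD (c2+1).toNat 0 - R2.getD c1.toNat 0 == c2 - c1 + 1 &&
             Ca.getD (r2+1).toNat 0 - Ca.getD r1.toNat 0 == r2 - r1 + 1 &&
             Cb.getD (r2+1).toNat 0 - Cb.getD r1.toNat 0 == r2 - r1 + 1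
          then fs ++ [(r1, c1, r2, c2)] else fs) fs) fs) fs) []

def transform_alt (grid : List (List Int)) : List (List Int) :=
  let n : Int := grid.length
  let m : Int := if 0 < n then ((grid.getD 0 []).length : Int) else 0
  let rowpref := (PySem.List.pyRange 0 n 1).foldl
    (fun acc r => acc ++ [pvPref (fun c => pvCell grid r c) m]) []
  let colpref := (PySem.List.pyRange 0 m 1).foldl
    (fun acc c => acc ++ [pvPref (fun r => pvCell grid r c) n]) []
  let frames := pvFramesB rowpref colpref n m
  frames.foldl (fun out fr =>
    let color : Int :=
      if PySem.Int.mod (fr.2.2.1 - fr.1) 2 == 1 && PySem.Int.mod (fr.2.2.2 - fr.2.1) 2 == 1 then 2 else 7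
    pvFill out fr.1 fr.2.1 fr.2.2.1 fr.2.2.2 color) grid

-- ===== PRECONDITION & SPEC =====
-- Pre_ excludes ragged grids (some row shorter than the first row): there Source B's prefix-sum pass
-- raises IndexError, and Source A itself raises IndexError on many of them.
def Pre_transform (grid : List (List Int)) : Prop :=
  ∀ row ∈ grid, (grid.headD []).length ≤ row.length
instance (grid : List (List Int)) : Decidable (Pre_transform grid) := by unfold Pre_transform; infer_instance

def pvWitness_transform : List (List Int) := [[1,1,1],[1,0,1],[1,1,1]]

def Spec_transform (grid : List (List Int)) (out : List (List Int)) : Prop := out = transform_alt grid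
instance (grid : List (List Int)) (out : List (List Int)) : Decidable (Spec_transform grid out) := by unfold Spec_transform; infer_instance

-- ===== CLAIM (what is proved, stated in full; the proofs are below) =====
def Claim_equal_transform : Prop := ∀ (grid : List (List Int)), Dom_transform grid → Pre_transform grid → Spec_transform grid (transform grid)

-- ===== LEMMAS AND PROOFS =====

-- number of i in [a, b) with f i = 1
def pvCnt (f : Int → Int) (a b : Int) : Int :=
  ((PySem.List.pyRange a b 1).countP (fun i => f i == 1) : Int)

theorem pvCnt_nil (f : Int → Int) (a b : Int) (h : b ≤ a) : pvCnt f a b = 0 := by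
  simp [pvCnt, PySem.List.pyRange_one_eq_nil h]

theorem pvCnt_cons (f : Int → Int) (a b : Int) (h : a < b) :
    pvCnt f a b = (if f a == 1 then (1:Int) else 0) + pvCnt f (a+1) b := by
  simp only [pvCnt, PySem.List.pyRange_one_cons h, List.countP_cons]
  by_cases hf : f a == 1 <;> simp [hf] <;> push_cast <;> ring

theorem pvCnt_split (f : Int → Int) (a b c : Int) (hab : a ≤ b) (hbc : b ≤ c) :
    pvCnt f a c = pvCnt f a b + pvCnt f b c := by
  simp only [pvCnt, PySem.List.pyRange_one_append a b c hab hbc, List.countP_append]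
  push_cast; ring

theorem pv_fold_pref (f : Int → Int) (a b : Int) (s : Int) (acc : List Int) :
    (PySem.List.pyRange a b 1).foldl (pvStep f) (s, acc) =
      (s + pvCnt f a b, acc ++ (PySem.List.pyRange a b 1).map (fun i => s + pvCnt f a (i+1))) := by
  obtain ⟨k, hk⟩ : ∃ k : Nat, (b - a).toNat = k := ⟨_, rfl⟩
  induction k generalizing a s acc with
  | zero =>
    have h : b ≤ a := by omega
    simp [PySem.List.pyRange_one_eq_nil h, pvCnt_nil f a b h]
  | succ k ih =>
    have h : a < b := by omega
    rw [PySem.List.pyRange_one_cons h]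
    simp only [List.foldl_cons, List.map_cons]
    have hstep : pvStep f (s, acc) a =
        (s + (if f a == 1 then (1:Int) else 0), acc ++ [s + (if f a == 1 then (1:Int) else 0)]) := rfl
    rw [hstep, ih (a+1) _ _ (by omega)]
    refine Prod.ext ?_ ?_
    · show s + (if f a == 1 then (1:Int) else 0) + pvCnt f (a+1) b = s + pvCnt f a b
      rw [pvCnt_cons f a b h]; ring
    · show (acc ++ [s + (if f a == 1 then (1:Int) else 0)]) ++
        (PySem.List.pyRange (a+1) b 1).map (fun i => s + (if f a == 1 then (1:Int) else 0) + pvCnt f (a+1) (i+1)) =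
        acc ++ ((s + pvCnt f a (a+1)) :: (PySem.List.pyRange (a+1) b 1).map (fun i => s + pvCnt f a (i+1)))
      have h1 : pvCnt f a (a+1) = (if f a == 1 then (1:Int) else 0) := by
        rw [pvCnt_cons f a (a+1) (by omega), pvCnt_nil f (a+1) (a+1) le_rfl]; ring
      have h2 : (PySem.List.pyRange (a+1) b 1).map
          (fun i => s + (if f a == 1 then (1:Int) else 0) + pvCnt f (a+1) (i+1)) =
          (PySem.List.pyRange (a+1) b 1).map (fun i => s + pvCnt f a (i+1)) := by
        apply List.map_congr_left
        intro i hi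
        have hib := PySem.List.mem_pyRange_one.mp hi
        rw [pvCnt_cons f a (i+1) (by omega)]; ring
      rw [h2, h1]
      simp

theorem pvPref_getD (f : Int → Int) (len k : Int) (h0 : 0 ≤ k) (hk : k ≤ len) :
    (pvPref f len).getD k.toNat 0 = pvCnt f 0 k := by
  rw [pvPref, pv_fold_pref f 0 len 0 [0]]
  cases hk0 : k.toNat with
  | zero =>
    have : k = 0 := by omega
    subst this
    simp [pvCnt_nil f 0 0 le_rfl]
  | succ j =>
    have hkj : k = (j : Int) + 1 := by omega
    have hlen : 0 ≤ len := by omega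
    have hnl : len = ((len.toNat : Nat) : Int) := by omega
    simp only [List.cons_append, List.nil_append, List.getD_cons_succ]
    have hjn : j < len.toNat := by omega
    have hpg := PySem.List.pyGetD_map_pyRange (fun i => 0 + pvCnt f 0 (i+1)) len.toNat j 0 hjn
    rw [PySem.List.pyGetD_natCast] at hpg
    rw [← hnl] at hpg
    rw [hpg, hkj]
    ring_nf

theorem pvCnt_eq_iff_all (f : Int → Int) (a b : Int) (h : a ≤ b) :
    (pvCnt f a b = b - a) ↔ (∀ i ∈ PySem.List.pyRange a b 1, f i = 1) := by
  have hl := PySem.List.length_pyRange_one (a := a) (b := b)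
  rw [pvCnt, show (∀ i ∈ PySem.List.pyRange a b 1, f i = 1) ↔
      ((PySem.List.pyRange a b 1).countP (fun i => f i == 1) = (PySem.List.pyRange a b 1).length)
    from by rw [List.countP_eq_length]; simp]
  constructor <;> intro hcp <;> omega

-- getD on a map over range(0, n)
theorem pv_getD_map_pyRange {α : Type} [Inhabited α] (h : Int → α) (n r : Int) (d : α)
    (h0 : 0 ≤ r) (hr : r < n) :
    (((PySem.List.pyRange 0 n 1).map h).getD r.toNat d) = h r := by
  have hn : 0 ≤ n := by omega
  have hpg := PySem.List.pyGetD_map_pyRange h n.toNat r.toNat d (by omega)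
  rw [PySem.List.pyGetD_natCast] at hpg
  have e2 : ((n.toNat : Nat) : Int) = n := by omega
  have e1 : ((r.toNat : Nat) : Int) = r := by omega
  rw [e1, e2] at hpg
  exact hpg

-- the pointwise condition equality: prefix-sum checks = border all-ones scans
theorem pv_cond_eq (grid : List (List Int)) (r1 r2 c1 c2 : Int)
    (hr1 : 0 ≤ r1) (hr12 : r1 + 2 ≤ r2) (hc1 : 0 ≤ c1) (hc12 : c1 + 2 ≤ c2)
    (n m : Int) (hr2n : r2 < n) (hc2m : c2 < m) :
    ((pvPref (fun c => pvCell grid r1 c) m).getD (c2+1).toNat 0 -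
       (pvPref (fun c => pvCell grid r1 c) m).getD c1.toNat 0 == c2 - c1 + 1 &&
     ((pvPref (fun c => pvCell grid r2 c) m).getD (c2+1).toNat 0 -
       (pvPref (fun c => pvCell grid r2 c) m).getD c1.toNat 0 == c2 - c1 + 1) &&
     ((pvPref (fun r => pvCell grid r c1) n).getD (r2+1).toNat 0 -
       (pvPref (fun r => pvCell grid r c1) n).getD r1.toNat 0 == r2 - r1 + 1) &&
     ((pvPref (fun r => pvCell grid r c2) n).getD (r2+1).toNat 0 -
       (pvPref (fun r => pvCell grid r c2) n).getD r1.toNat 0 == r2 - r1 + 1)) =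
    ((PySem.List.pyRange c1 (c2+1) 1).all (fun c => pvCell grid r1 c == 1 && pvCell grid r2 c == 1) &&
     (PySem.List.pyRange r1 (r2+1) 1).all (fun r => pvCell grid r c1 == 1 && pvCell grid r c2 == 1)) := by
  have key : ∀ (f : Int → Int) (len a b : Int), 0 ≤ a → a + 2 ≤ b → b < len →
      (((pvPref f len).getD (b+1).toNat 0 - (pvPref f len).getD a.toNat 0 == b - a + 1) =
        (PySem.List.pyRange a (b+1) 1).all (fun i => f i == 1)) := by
    intro f len a b h0 hab hbl
    rw [pvPref_getD f len (b+1) (by omega) (by omega), pvPref_getD f len a (by omega) (by omega)]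
    rw [Bool.eq_iff_iff]
    simp only [beq_iff_eq, List.all_eq_true]
    rw [← pvCnt_eq_iff_all f a (b+1) (by omega)]
    have hsp := pvCnt_split f 0 a (b+1) (by omega) (by omega)
    omega
  rw [key _ m c1 c2 hc1 hc12 hc2m, key _ m c1 c2 hc1 hc12 hc2m,
      key _ n r1 r2 hr1 hr12 hr2n, key _ n r1 r2 hr1 hr12 hr2n]
  rw [Bool.eq_iff_iff]
  simp only [Bool.and_eq_true, List.all_eq_true, beq_iff_eq]
  constructor
  · rintro ⟨⟨⟨hA, hB⟩, hC⟩, hD⟩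
    exact ⟨fun c hc => ⟨hA c hc, hB c hc⟩, fun r hr => ⟨hC r hr, hD r hr⟩⟩
  · rintro ⟨hRow, hCol⟩
    exact ⟨⟨⟨fun c hc => (hRow c hc).1, fun c hc => (hRow c hc).2⟩,
            fun r hr => (hCol r hr).1⟩, fun r hr => (hCol r hr).2⟩

-- the two frame enumerations agree
theorem pv_frames_eq (grid : List (List Int)) (n m : Int) :
    pvFramesB
      ((PySem.List.pyRange 0 n 1).foldl (fun acc r => acc ++ [pvPref (fun c => pvCell grid r c) m]) [])
      ((PySem.List.pyRange 0 m 1).foldl (fun acc c => acc ++ [pvPref (fun r => pvCell grid r c) n]) [])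
      n m = pvFramesA grid n m := by
  unfold pvFramesA pvFramesB
  rw [PySem.List.foldl_append_singleton_eq_map, PySem.List.foldl_append_singleton_eq_map]
  simp only [List.nil_append]
  refine PySem.List.foldl_congr_mem' _ _ _ _ ?_
  intro r1 hr1 fs
  refine PySem.List.foldl_congr_mem' _ _ _ _ ?_
  intro r2 hr2 fs
  refine PySem.List.foldl_congr_mem' _ _ _ _ ?_
  intro c1 hc1 fs
  refine PySem.List.foldl_congr_mem' _ _ _ _ ?_
  intro c2 hc2 fs
  obtain ⟨hr1a, hr1b⟩ := PySem.List.mem_pyRange_one.mp hr1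
  obtain ⟨hr2a, hr2b⟩ := PySem.List.mem_pyRange_one.mp hr2
  obtain ⟨hc1a, hc1b⟩ := PySem.List.mem_pyRange_one.mp hc1
  obtain ⟨hc2a, hc2b⟩ := PySem.List.mem_pyRange_one.mp hc2
  simp only [List.nil_append,
    pv_getD_map_pyRange (fun r => pvPref (fun c => pvCell grid r c) m) n r1 [] hr1a (by omega : r1 < n),
    pv_getD_map_pyRange (fun r => pvPref (fun c => pvCell grid r c) m) n r2 [] (by omega : (0:Int) ≤ r2) (by omega : r2 < n),
    pv_getD_map_pyRange (fun c => pvPref (fun r => pvCell grid r c) n) m c1 [] hc1a (by omega : c1 < m),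
    pv_getD_map_pyRange (fun c => pvPref (fun r => pvCell grid r c) n) m c2 [] (by omega : (0:Int) ≤ c2) (by omega : c2 < m),
    pv_cond_eq grid r1 r2 c1 c2 hr1a (by omega : r1 + 2 ≤ r2) hc1a (by omega : c1 + 2 ≤ c2) n m (by omega : r2 < n) (by omega : c2 < m)]
  cases hok : (PySem.List.pyRange c1 (c2+1) 1).all (fun c => pvCell grid r1 c == 1 && pvCell grid r2 c == 1) <;>
    cases hok2 : (PySem.List.pyRange r1 (r2+1) 1).all (fun r => pvCell grid r c1 == 1 && pvCell grid r c2 == 1) <;>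
    simp

-- invariant of a foldl over lists
theorem pv_foldl_inv {α β : Type} (P : β → Prop) (f : List β → α → List β) (L : List α) (init : List β)
    (h0 : ∀ y ∈ init, P y) (hf : ∀ s x, x ∈ L → (∀ y ∈ s, P y) → ∀ y ∈ f s x, P y) :
    ∀ y ∈ L.foldl f init, P y := by
  induction L generalizing init with
  | nil => exact h0
  | cons x xs ih =>
    intro y hy
    refine ih (f init x) (hf init x (by simp) h0) ?_ y hy
    intro s x' hx' hs
    exact hf s x' (by simp [hx']) hs

theorem pv_frames_bound (g : List (List Int)) (n m : Int) :
    ∀ fr ∈ pvFramesA g n m, fr.1 + 2 ≤ fr.2.2.1 ∧ fr.2.1 + 2 ≤ fr.2.2.2 := by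
  unfold pvFramesA
  refine pv_foldl_inv _ _ _ _ (by simp) ?_
  intro fs r1 hr1 hfs
  refine pv_foldl_inv _ _ _ _ hfs ?_
  intro fs2 r2 hr2 hfs2
  refine pv_foldl_inv _ _ _ _ hfs2 ?_
  intro fs3 c1 hc1 hfs3
  refine pv_foldl_inv _ _ _ _ hfs3 ?_
  intro fs4 c2 hc2 hfs4
  intro y hy
  have hy' : y ∈ fs4 ++ [(r1, c1, r2, c2)] := by
    dsimp only at hy
    split at hy
    · exact List.mem_append_left _ hy
    · split at hy
      · exact hy
      · exact List.mem_append_left _ hy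
  rcases List.mem_append.mp hy' with h | h
  · exact hfs4 y h
  · obtain ⟨h2a, _⟩ := PySem.List.mem_pyRange_one.mp hr2
    obtain ⟨h4a, _⟩ := PySem.List.mem_pyRange_one.mp hc2
    simp only [List.mem_singleton] at h
    subst h
    exact ⟨by omega, by omega⟩

-- the two painting passes agree on frames with a nonempty interior
theorem pv_paint_eq (frames : List (Int × Int × Int × Int)) (g : List (List Int))
    (hb : ∀ fr ∈ frames, fr.1 + 2 ≤ fr.2.2.1 ∧ fr.2.1 + 2 ≤ fr.2.2.2) :
    frames.foldl (fun g fr =>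
      let height := fr.2.2.1 - fr.1 - 1
      let width := fr.2.2.2 - fr.2.1 - 1
      if height ≤ 0 ∨ width ≤ 0 then g
      else
        let color : Int := if PySem.Int.mod height 2 == 0 && PySem.Int.mod width 2 == 0 then 2 else 7
        pvFill g fr.1 fr.2.1 fr.2.2.1 fr.2.2.2 color) g =
    frames.foldl (fun out fr =>
      let color : Int :=
        if PySem.Int.mod (fr.2.2.1 - fr.1) 2 == 1 && PySem.Int.mod (fr.2.2.2 - fr.2.1) 2 == 1 then 2 else 7
      pvFill out fr.1 fr.2.1 fr.2.2.1 fr.2.2.2 color) g := by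
  refine PySem.List.foldl_congr_mem' _ _ _ _ ?_
  intro fr hfr out
  obtain ⟨h1, h2⟩ := hb fr hfr
  dsimp only
  rw [if_neg (by omega : ¬(fr.2.2.1 - fr.1 - 1 ≤ 0 ∨ fr.2.2.2 - fr.2.1 - 1 ≤ 0))]
  have hcol : (if PySem.Int.mod (fr.2.2.1 - fr.1 - 1) 2 == 0 && PySem.Int.mod (fr.2.2.2 - fr.2.1 - 1) 2 == 0 then (2:Int) else 7) =
      (if PySem.Int.mod (fr.2.2.1 - fr.1) 2 == 1 && PySem.Int.mod (fr.2.2.2 - fr.2.1) 2 == 1 then (2:Int) else 7) := by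
    simp only [PySem.Int.mod_eq_emod_of_pos (by omega : (0:Int) < 2)]
    have hiff : ((fr.2.2.1 - fr.1 - 1) % 2 == 0 && (fr.2.2.2 - fr.2.1 - 1) % 2 == 0) =
        ((fr.2.2.1 - fr.1) % 2 == 1 && (fr.2.2.2 - fr.2.1) % 2 == 1) := by
      rw [Bool.eq_iff_iff]
      simp only [Bool.and_eq_true, beq_iff_eq]
      omega
    rw [hiff]
  rw [hcol]

theorem transform_spec' : ∀ (grid : List (List Int)), transform grid = transform_alt grid := by
  intro grid
  show (pvFramesA grid _ _).foldl _ grid = (pvFramesB _ _ _ _).foldl _ grid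
  rw [pv_frames_eq grid]
  exact pv_paint_eq _ grid (pv_frames_bound grid _ _)

-- ===== VERDICT (by name: the statement is the Claim_ definition above) =====
theorem transform_spec : Claim_equal_transform := by
  intro grid _ _
  unfold Spec_transform
  exact transform_spec' grid
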